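-- pv_equiv track=rewrite | github.com/EthanHunt711/Turtle | week5.py | allit
-- ===== SOURCE A (Python) =====
-- def allit(words):
--     if len(words) <= 1:
--         return True
--     else:
--         first_letter = words[0][0].lower()
--         for w in words:
--             w = w.lower()
--             if w[0] != first_letter:
--                 return False
--         return True
-- ===== SOURCE B (Python) =====
-- def allit(words):
--     return all(u[0].lower() == v[0].lower() for u, v in zip(words, words[1:]))
-- ===== Notes on version B (the rewrite author's own statement) =====
-- stated objective: idiomatic
-- what changed: B drops the stored first_letter, the whole-word lowercasing and the length guard: it checks only adjacent pairs of words for equal lowercased initials (correct by transitivity of equality) with a single all() over zip(words, words[1:]).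
import Mathlib
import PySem

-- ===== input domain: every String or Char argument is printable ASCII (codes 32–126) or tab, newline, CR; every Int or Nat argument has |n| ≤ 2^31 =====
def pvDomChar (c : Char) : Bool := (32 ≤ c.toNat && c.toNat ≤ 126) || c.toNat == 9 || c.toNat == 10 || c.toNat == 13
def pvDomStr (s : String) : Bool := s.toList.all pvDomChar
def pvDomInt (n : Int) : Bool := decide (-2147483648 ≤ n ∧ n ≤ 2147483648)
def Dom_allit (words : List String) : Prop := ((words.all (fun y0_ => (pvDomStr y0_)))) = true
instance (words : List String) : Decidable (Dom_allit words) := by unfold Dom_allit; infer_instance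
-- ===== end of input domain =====

-- B replaces A's compare-each-word-against-the-stored-first-letter loop (with its length guard)
-- by a single all() over adjacent pairs zip(words, words[1:]), correct by transitivity of
-- equality (objective: idiomatic).

-- ===== PORT A =====
-- the for-loop of A: compare each word's lowercased first letter with first_letter
def allitLoop (first : Char) : List String → Bool
  | [] => true
  | w :: ws =>
    match PySem.Str.pyGet? (PySem.Str.lower w) 0 with
    | none => false          -- w[0] raises IndexError in Python; outside Pre_allit
    | some c => if c ≠ first then false else allitLoop first ws

def allit (words : List String) : Bool :=
  if words.length ≤ 1 then true
  else
    match PySem.List.pyGet? words 0 with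
    | none => false          -- unreachable (length ≥ 2)
    | some w0 =>
      match PySem.Str.pyGet? w0 0 with
      | none => false        -- words[0][0] raises IndexError in Python; outside Pre_allit
      -- .lower() of the one-character string words[0][0] = lowerChar of that character (exact)
      | some c => allitLoop (PySem.Chars.lowerChar c) words

-- ===== PORT B =====
-- the short-circuiting all(...) over zip(words, words[1:]): recursion over the pair list
def allitAltPairs : List (String × String) → Bool
  | [] => true
  | (u, v) :: ps =>
    match PySem.Str.pyGet? u 0, PySem.Str.pyGet? v 0 with
    | some cu, some cv =>
        -- u[0].lower() == v[0].lower(): lower of a one-character string is lowerChar (exact)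
        if PySem.Chars.lowerChar cu = PySem.Chars.lowerChar cv then allitAltPairs ps else false
    | _, _ => false          -- u[0] or v[0] raises IndexError in Python; outside Pre_allit

def allit_alt (words : List String) : Bool :=
  allitAltPairs (words.zip words.tail)

-- ===== PRECONDITION & SPEC =====
-- Pre_ excludes exactly the inputs on which both programs raise IndexError: length ≥ 2 and
-- some word is empty while every earlier word is nonempty with the same lowercased initial
-- as words[0] (so the loop actually reaches the empty word and indexes it).
def Pre_allit (words : List String) : Prop :=
  words.length ≤ 1 ∨
    ∀ i < words.length,
      (∀ j < i, (words.getD j "") ≠ "" ∧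
         PySem.Chars.lowerChar (((words.getD j "").toList).headD ' ')
           = PySem.Chars.lowerChar (((words.getD 0 "").toList).headD ' ')) →
      words.getD i "" ≠ ""
instance (words : List String) : Decidable (Pre_allit words) := by unfold Pre_allit; infer_instance

def pvWitness_allit : List String := ["Apple", "apricot", "Axe"]

def Spec_allit (words : List String) (out : Bool) : Prop := out = allit_alt words
instance (words : List String) (out : Bool) : Decidable (Spec_allit words out) := by unfold Spec_allit; infer_instance

-- ===== CLAIM (what is proved, stated in full; the proofs are below) =====
def Claim_equal_allit : Prop := ∀ (words : List String), Dom_allit words → Pre_allit words → Spec_allit words (allit words)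

-- ===== LEMMAS AND PROOFS =====

-- taking the first character of the lowercased string = lowercasing the first character
lemma pyGet?_lower_zero (w : String) :
    PySem.Str.pyGet? (PySem.Str.lower w) 0 =
      (PySem.Str.pyGet? w 0).map PySem.Chars.lowerChar := by
  simp [PySem.Str.pyGet?_eq, PySem.Str.toList_lower, PySem.Chars.lower,
        PySem.List.pyGet?_zero]

-- one-step unfolding of A's loop with the head's access rewritten to the list side
lemma allitLoop_cons (first : Char) (w : String) (ws : List String) :
    allitLoop first (w :: ws) =
      match (PySem.Str.pyGet? w 0).map PySem.Chars.lowerChar with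
      | none => false
      | some c => if c ≠ first then false else allitLoop first ws := by
  rw [allitLoop, pyGet?_lower_zero]

-- A's loop started at a word whose lowercased initial IS `first` agrees with B's
-- adjacent-pair check on the same suffix (transitivity: every earlier word matched `first`)
lemma loop_eq_pairs (first : Char) (ws : List String) :
    ∀ (w : String) (c : Char), PySem.Str.pyGet? w 0 = some c →
      PySem.Chars.lowerChar c = first →
      allitLoop first (w :: ws) = allitAltPairs ((w :: ws).zip ws) := by
  induction ws with
  | nil =>
    intro w c hw hc
    rw [allitLoop_cons, hw]
    simp [hc, allitAltPairs, allitLoop]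
  | cons v vs ih =>
    intro w c hw hc
    rw [allitLoop_cons, hw]
    simp only [Option.map_some, hc, ne_eq, not_true_eq_false, if_false,
      List.zip_cons_cons, allitAltPairs, hw]
    cases hv : PySem.Str.pyGet? v 0 with
    | none => rw [allitLoop_cons, hv]; rfl
    | some d =>
      by_cases hd : PySem.Chars.lowerChar d = first
      · rw [ih v d hv hd]
        simp [hc, hd]
      · rw [allitLoop_cons, hv]
        simp only [Option.map_some]
        rw [if_pos hd, if_neg (by rw [hc]; exact fun h => hd h.symm)]

lemma ports_eq (words : List String) : allit words = allit_alt words := by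
  unfold allit allit_alt
  match words with
  | [] => rfl
  | [w] => simp [allitAltPairs]
  | w :: v :: ws =>
    have hl : ¬ (w :: v :: ws).length ≤ 1 := by simp [List.length]
    simp only [hl, if_false, PySem.List.pyGet?_zero_cons, List.tail_cons]
    cases hw : PySem.Str.pyGet? w 0 with
    | none =>
      have hw' : PySem.List.pyGet? w.toList 0 = none := by simpa using hw
      simp [allitAltPairs, hw']
    | some c =>
      exact loop_eq_pairs _ (v :: ws) w c hw rfl

-- ===== VERDICT (by name: the statement is the Claim_ definition above) =====
theorem allit_spec : Claim_equal_allit := by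
  intro words _ _
  unfold Spec_allit
  exact ports_eq words
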